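-- pv_equiv track=rewrite | github.com/intelprasada/nsaddaga.PcoreFitScripts | tools/interfacespec/generate_module_io_table.py | split_tlm_units
-- ===== SOURCE A (Python) =====
-- def split_tlm_units(units: set) -> tuple:
--     """Split connected units into non-TLM and *_tlm groups."""
--     non_tlm = set()
--     tlm = set()
--     for unit in units:
--         if unit.lower().endswith("_tlm"):
--             tlm.add(unit)
--         else:
--             non_tlm.add(unit)
--     return non_tlm, tlm
-- ===== SOURCE B (Python) =====
-- def split_tlm_units(units: set) -> tuple:
--     """Split connected units into non-TLM and *_tlm groups.
--
--     Recursive divide-and-conquer: halve the unit list, partition each half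
--     recursively, and merge the two partial partitions with set union.
--     """
--     def go(lst):
--         if not lst:
--             return set(), set()
--         if len(lst) == 1:
--             u = lst[0]
--             if u.lower().endswith("_tlm"):
--                 return set(), {u}
--             return {u}, set()
--         mid = len(lst) // 2
--         n1, t1 = go(lst[:mid])
--         n2, t2 = go(lst[mid:])
--         return n1 | n2, t1 | t2
--
--     return go(list(units))
-- ===== Notes on version B (the rewrite author's own statement) =====
-- stated objective: alternative
-- what changed: Replaces A's single-pass two-branch accumulation loop with a recursive divide-and-conquer: halve the list, partition each half recursively, and merge the partial results with set union.
import Mathlib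
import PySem

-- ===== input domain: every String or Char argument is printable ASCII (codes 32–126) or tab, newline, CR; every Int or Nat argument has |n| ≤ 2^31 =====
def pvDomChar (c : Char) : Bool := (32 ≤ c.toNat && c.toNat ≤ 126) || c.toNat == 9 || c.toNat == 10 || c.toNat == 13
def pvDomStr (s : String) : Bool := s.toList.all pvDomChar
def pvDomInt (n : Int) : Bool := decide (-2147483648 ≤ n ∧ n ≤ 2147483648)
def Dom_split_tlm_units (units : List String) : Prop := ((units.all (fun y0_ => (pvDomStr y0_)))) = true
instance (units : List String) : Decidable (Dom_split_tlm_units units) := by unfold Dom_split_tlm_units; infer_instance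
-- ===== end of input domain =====

-- B partitions by divide-and-conquer (halve, recurse, merge with set union) instead of A's
-- single accumulation loop; objective: alternative.

-- ===== PORT A =====
def split_tlm_units (units : List String) : List String × List String :=
  units.foldl
    (fun acc unit =>
      if PySem.Str.endswith (PySem.Str.lower unit) "_tlm" then (acc.1, PySem.Set.add acc.2 unit)
      else (PySem.Set.add acc.1 unit, acc.2))
    (PySem.Set.empty, PySem.Set.empty)

-- ===== PORT B =====
-- u.lower().endswith("_tlm")
def pvIsTlm (u : String) : Bool := PySem.Str.endswith (PySem.Str.lower u) "_tlm"

-- the inner helper go(lst); lst[:mid] / lst[mid:] with 0 ≤ mid ≤ len(lst) are exactly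
-- List.take mid / List.drop mid; the fuel argument (≥ length, decremented per level) only
-- makes the halving recursion structural — the 0-fuel branch is unreachable from the entry
def pvGo : Nat → List String → List String × List String
  | _, [] => (PySem.Set.empty, PySem.Set.empty)
  | _, [u] => if pvIsTlm u then (PySem.Set.empty, [u]) else ([u], PySem.Set.empty)
  | 0, _ :: _ :: _ => (PySem.Set.empty, PySem.Set.empty)
  | fuel + 1, a :: b :: t =>
      let lst := a :: b :: t
      let mid := lst.length / 2
      let r1 := pvGo fuel (lst.take mid)
      let r2 := pvGo fuel (lst.drop mid)
      (PySem.Set.union r1.1 r2.1, PySem.Set.union r1.2 r2.2)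

-- list(units) is the distinct-element list units itself
def split_tlm_units_alt (units : List String) : List String × List String :=
  pvGo units.length units

-- ===== PRECONDITION & SPEC =====
def Spec_split_tlm_units (units : List String) (out : List String × List String) : Prop := out = split_tlm_units_alt units
instance (units : List String) (out : List String × List String) : Decidable (Spec_split_tlm_units units out) := by unfold Spec_split_tlm_units; infer_instance

-- ===== CLAIM (what is proved, stated in full; the proofs are below) =====
def Claim_equal_split_tlm_units : Prop := ∀ (units : List String), Dom_split_tlm_units units → Spec_split_tlm_units units (split_tlm_units units)

-- ===== LEMMAS AND PROOFS =====

-- updating by a deduplicated list adds the same elements in the same order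
theorem pv_update_ofList {α : Type} [BEq α] [LawfulBEq α] (s : PySem.Set α) (xs : List α) :
    PySem.Set.update s (PySem.Set.ofList xs) = PySem.Set.update s xs := by
  rw [PySem.Set.update_eq_append_filter, PySem.Set.update_eq_append_filter,
    PySem.Set.ofList_ofList]

-- set union of the deduplications is the deduplication of the concatenation
theorem pv_union_ofList {α : Type} [BEq α] [LawfulBEq α] (a b : List α) :
    PySem.Set.union (PySem.Set.ofList a) (PySem.Set.ofList b) = PySem.Set.ofList (a ++ b) := by
  rw [PySem.Set.union, pv_update_ofList, PySem.Set.ofList_append]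

-- characterisation of B's divide-and-conquer: with enough fuel it computes the two filtered sets
theorem pvGo_eq : ∀ (n : Nat) (lst : List String), lst.length ≤ n →
    pvGo n lst = (PySem.Set.ofList (lst.filter (fun u => !pvIsTlm u)),
                  PySem.Set.ofList (lst.filter pvIsTlm)) := by
  intro n
  induction n with
  | zero =>
    intro lst h
    have : lst = [] := List.eq_nil_of_length_eq_zero (Nat.le_zero.mp h)
    subst this; rfl
  | succ n ih =>
    intro lst h
    match lst with
    | [] => rfl
    | [u] =>
      by_cases hp : pvIsTlm u <;>
        simp [pvGo, hp, PySem.Set.ofList, PySem.Set.add, PySem.Set.empty]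
    | a :: b :: t =>
      rw [pvGo]
      set L := a :: b :: t with hL
      set mid := L.length / 2 with hmid
      have h1 : (L.take mid).length ≤ n := by
        simp only [List.length_take, List.length_cons, hL]
        have : L.length ≤ n + 1 := h
        simp only [hL, List.length_cons] at this
        omega
      have h2 : (L.drop mid).length ≤ n := by
        simp only [List.length_drop, hL, List.length_cons]
        have : L.length ≤ n + 1 := h
        simp only [hL, List.length_cons] at this
        rw [hmid, hL]; simp only [List.length_cons]; omega
      rw [ih _ h1, ih _ h2]
      simp only [pv_union_ofList, ← List.filter_append, List.take_append_drop]

-- ===== VERDICT (by name: the statement is the Claim_ definition above) =====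
theorem split_tlm_units_spec : Claim_equal_split_tlm_units := by
  intro units _
  unfold Spec_split_tlm_units split_tlm_units split_tlm_units_alt
  set p : String → Bool := fun u => PySem.Str.endswith (PySem.Str.lower u) "_tlm" with hp
  have hbody :
      (fun (acc : List String × List String) unit =>
          if p unit then (acc.1, PySem.Set.add acc.2 unit)
          else (PySem.Set.add acc.1 unit, acc.2)) =
      fun acc unit =>
        ((fun a u => if (!p u) then PySem.Set.add a u else a) acc.1 unit,
         (fun a u => if p u then PySem.Set.add a u else a) acc.2 unit) := by
    funext acc unit
    by_cases h : p unit <;> simp [h]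
  rw [hbody,
    PySem.List.foldl_prod_mk (f := fun a u => if (!p u) then PySem.Set.add a u else a)
      (g := fun a u => if p u then PySem.Set.add a u else a),
    PySem.List.foldl_if_eq_foldl_filter, PySem.List.foldl_if_eq_foldl_filter]
  rw [pvGo_eq units.length units le_rfl]
  rfl
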